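-- pv_equiv track=rewrite | github.com/atropos-null/LS | py110/additional_problems/alphabet_symmetry.py | solve
-- ===== SOURCE A (Python) =====
-- def solve(lst):
--
--     abc = {"a": 1,
--         "b": 2,
--         "c": 3,
--         "d": 4,
--         "e": 5,
--         "f": 6,
--         "g": 7,
--         "h": 8,
--         "i": 9,
--         "j": 10,
--         "k": 11,
--         "l": 12,
--         "m": 13,
--         "n": 14,
--         "o": 15,
--         "p": 16,
--         "q": 17,
--         "r": 18,
--         "s": 19,
--         "t": 20,
--         "u": 21,
--         "v": 22,
--         "w": 23,
--         "x": 24,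
--         "y": 25,
--         "z": 26
--         }
--
--     result = []
--     count = 0
--
--     for element in lst:
--         for index, character in enumerate(element.casefold()):
--             if index + 1 == abc.get(character):
--                 count += 1
--         result.append(count)
--         count = 0
--
--     return result
-- ===== SOURCE B (Python) =====
-- def _count(f, i):
--     if i >= len(f) or i >= 26:
--         return 0
--     return (ord(f[i]) - 97 == i) + _count(f, i + 1)
--
--
-- def solve(lst):
--     return [_count(element.casefold(), 0) for element in lst]
-- ===== Notes on version B (the rewrite author's own statement) =====
-- stated objective: alternative
-- what changed: Replaces A's 26-entry dict + enumerate loop with a manual accumulator by a recursive helper that walks the string by index in lockstep with the code points 97..122, testing ord(f[i]) - 97 == i and stopping after 26 characters, so no alphabet table or dict lookup exists at all.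
import Mathlib
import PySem

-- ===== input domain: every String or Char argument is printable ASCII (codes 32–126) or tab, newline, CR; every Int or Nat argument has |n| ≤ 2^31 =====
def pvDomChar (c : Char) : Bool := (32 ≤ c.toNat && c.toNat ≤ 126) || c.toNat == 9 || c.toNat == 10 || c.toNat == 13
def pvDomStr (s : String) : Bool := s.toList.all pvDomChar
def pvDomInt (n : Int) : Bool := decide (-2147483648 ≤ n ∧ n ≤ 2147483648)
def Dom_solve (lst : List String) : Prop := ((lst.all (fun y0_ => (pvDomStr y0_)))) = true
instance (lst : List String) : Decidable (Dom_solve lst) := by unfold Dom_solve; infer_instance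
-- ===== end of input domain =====

-- B replaces A's dict + enumerate loop by a bounded recursion comparing code points
-- (ord(f[i]) - 97 == i, stopping after 26 characters) — an alternative decomposition.


-- ===== PORT A =====
-- the dict literal 'abc'
def abcDict : PySem.Dict Char Int := PySem.Dict.ofList
  [('a',1),('b',2),('c',3),('d',4),('e',5),('f',6),('g',7),('h',8),('i',9),('j',10),
   ('k',11),('l',12),('m',13),('n',14),('o',15),('p',16),('q',17),('r',18),('s',19),
   ('t',20),('u',21),('v',22),('w',23),('x',24),('y',25),('z',26)]

-- for element in lst: for index, character in enumerate(element.casefold()):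
--   if index + 1 == abc.get(character): count += 1;  result.append(count); count = 0
def solve (lst : List String) : List Int :=
  lst.foldl (fun result element =>
    result ++ [(PySem.List.enumerate (PySem.Str.lower element).toList 0).foldl
      (fun count p => if (some (p.1 + 1) == abcDict.get? p.2) then count + 1 else count) 0]) []

-- ===== PORT B =====
-- def _count(f, i): if i >= len(f) or i >= 26: return 0
--                   return (ord(f[i]) - 97 == i) + _count(f, i + 1)
def countAlt (f : List Char) (i : Nat) : Int :=
  if f.length ≤ i ∨ 26 ≤ i then 0
  else (match PySem.List.pyGet? f (i : Int) with
        | some c => if ((c.toNat : Int) - 97 == (i : Int)) then (1 : Int) else 0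
        | none => 0) + countAlt f (i + 1)
termination_by f.length - i
decreasing_by omega

-- [ _count(element.casefold(), 0) for element in lst ]
def solve_alt (lst : List String) : List Int :=
  lst.map (fun element => countAlt (PySem.Str.lower element).toList 0)

-- ===== PRECONDITION & SPEC =====
def Spec_solve (lst : List String) (out : List Int) : Prop := out = solve_alt lst
instance (lst : List String) (out : List Int) : Decidable (Spec_solve lst out) := by unfold Spec_solve; infer_instance

-- ===== CLAIM (what is proved, stated in full; the proofs are below) =====
def Claim_equal_solve : Prop := ∀ (lst : List String), Dom_solve lst → Spec_solve lst (solve lst)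

-- ===== LEMMAS AND PROOFS =====

def alphabetB : List Char := "abcdefghijklmnopqrstuvwxyz".toList

-- association list of consecutive values starting at v (proof-side view of the dict)
def zipFrom : List Char → Int → List (Char × Int)
  | [], _ => []
  | h :: t, v => (h, v) :: zipFrom t (v + 1)

lemma abcDict_eq : abcDict = PySem.Dict.mk (zipFrom alphabetB 1) := rfl

-- a value smaller than every stored value is never hit
lemma zipFrom_get_lt (l : List Char) (v w : Int) (c : Char) (h : w < v) :
    (some w == (PySem.Dict.mk (zipFrom l v)).get? c) = false := by
  induction l generalizing v with
  | nil => simp [zipFrom, PySem.Dict.get?]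
  | cons hd t ih =>
    simp only [zipFrom, PySem.Dict.get?_mk_cons]
    by_cases hc : (hd == c) = true
    · rw [if_pos hc]; simp; omega
    · rw [if_neg hc]; exact ih (v + 1) (by omega)

-- the key condition: "some (v + s) equals the lookup of c" ↔ c is the head of l.drop s
lemma zipFrom_cond (l : List Char) (hnd : l.Nodup) (v : Int) (s : Nat) (c : Char) :
    (some (v + s) == (PySem.Dict.mk (zipFrom l v)).get? c)
      = (match l.drop s with | [] => false | h :: _ => c == h) := by
  induction l generalizing v s with
  | nil => simp [zipFrom, PySem.Dict.get?]
  | cons hd t ih =>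
    simp only [zipFrom, PySem.Dict.get?_mk_cons]
    rcases s with _ | s'
    · simp only [List.drop_zero]
      by_cases h : hd = c
      · subst h; simp
      · have hb : (hd == c) = false := by simp [h]
        have hc : (c == hd) = false := by simp [Ne.symm h]
        rw [if_neg (by simp [h]), hc]
        simpa using zipFrom_get_lt t (v + 1) v c (by omega)
    · simp only [List.drop_succ_cons]
      by_cases h : hd = c
      · subst h
        rw [if_pos (by simp)]
        have : (some (v + (s' + 1 : Nat)) == some v) = false := by simp; omega
        rw [this]
        have hmem : hd ∉ t := (List.nodup_cons.mp hnd).1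
        cases hdrop : t.drop s' with
        | nil => rfl
        | cons x xs =>
          have hx : x ∈ t := by
            have : x ∈ t.drop s' := by rw [hdrop]; exact List.mem_cons_self
            exact List.mem_of_mem_drop this
          have : ¬ (hd = x) := fun he => hmem (he ▸ hx)
          simp [this]
      · rw [if_neg (by simp [h])]
        have := ih (List.nodup_cons.mp hnd).2 (v + 1) s'
        rw [show v + (s' + 1 : Nat) = (v + 1) + (s' : Nat) by push_cast; ring]
        exact this

lemma alphabetB_nodup : alphabetB.Nodup := by decide

-- A's inner loop, generalized over the start index / alphabet suffix
lemma inner_eq (cs : List Char) (s : Nat) (acc : Int) :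
    (PySem.List.enumerate cs (s : Int)).foldl
      (fun count p => if (some (p.1 + 1) == abcDict.get? p.2) then count + 1 else count) acc
    = acc + ((cs.zip (alphabetB.drop s)).map
        (fun p => if p.1 == p.2 then (1 : Int) else 0)).sum := by
  induction cs generalizing s acc with
  | nil => simp [PySem.List.enumerate_nil]
  | cons c cs ih =>
    rw [PySem.List.enumerate_cons]
    simp only [List.foldl_cons]
    have hcond : (some ((s : Int) + 1) == abcDict.get? c)
        = (match alphabetB.drop s with | [] => false | h :: _ => c == h) := by
      rw [abcDict_eq, show (s : Int) + 1 = 1 + (s : Nat) by ring]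
      exact zipFrom_cond alphabetB alphabetB_nodup 1 s c
    have hstep : ((s : Int) + 1) = (((s + 1 : Nat)) : Int) := by push_cast; ring
    have hkey : alphabetB.drop (s + 1) = (alphabetB.drop s).tail := by
      rw [← List.drop_one, List.drop_drop, Nat.add_comm]
    cases hdrop : alphabetB.drop s with
    | nil =>
      have hdrop' : alphabetB.drop (s + 1) = [] := by rw [hkey, hdrop]; rfl
      rw [hdrop] at hcond
      rw [hcond]
      simp only [Bool.false_eq_true, if_false]
      rw [hstep, ih (s + 1) acc, hdrop']
      simp
    | cons h rest =>
      have hdrop' : alphabetB.drop (s + 1) = rest := by rw [hkey, hdrop]; rfl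
      rw [hdrop] at hcond
      rw [hcond, hstep, ih (s + 1), hdrop']
      simp only [List.zip_cons_cons, List.map_cons, List.sum_cons]
      by_cases hch : c == h
      · rw [if_pos hch, if_pos hch]; ring
      · rw [if_neg (by simp_all), if_neg (by simp_all)]; ring

-- the alphabet entry at index i is the character with code 97 + i
lemma alphabetB_toNat : ∀ i < 26, (alphabetB[i]?.map Char.toNat) = some (97 + i) := by decide

lemma alphabetB_length : alphabetB.length = 26 := by decide

lemma char_toNat_inj (a b : Char) (h : a.toNat = b.toNat) : a = b := by
  apply Char.ext
  exact UInt32.toNat_inj.mp h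

-- B's recursion computes the same zip-sum, generalized over the start index
lemma countAlt_eq (cs : List Char) (i : Nat) :
    countAlt cs i = (((cs.drop i).zip (alphabetB.drop i)).map
        (fun p => if p.1 == p.2 then (1 : Int) else 0)).sum := by
  rw [countAlt]
  by_cases hstop : cs.length ≤ i ∨ 26 ≤ i
  · rw [if_pos hstop]
    rcases hstop with h | h
    · have hnil : cs.drop i = [] := List.drop_eq_nil_of_le h
      rw [hnil]; simp
    · have hnil : alphabetB.drop i = [] :=
        List.drop_eq_nil_of_le (by rw [alphabetB_length]; exact h)
      rw [hnil]; simp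
  · rw [if_neg hstop]
    have hlen : i < cs.length := by by_contra hh; exact hstop (Or.inl (by omega))
    have h26 : i < 26 := by by_contra hh; exact hstop (Or.inr (by omega))
    have hlt' : i < alphabetB.length := by rw [alphabetB_length]; exact h26
    have hat : (alphabetB[i]'hlt').toNat = 97 + i := by
      have h1 := alphabetB_toNat i h26
      rw [List.getElem?_eq_getElem hlt'] at h1
      simpa using h1
    have hcs : cs.drop i = cs[i] :: cs.drop (i + 1) := List.drop_eq_getElem_cons hlen
    have hab : alphabetB.drop i = alphabetB[i] :: alphabetB.drop (i + 1) :=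
      List.drop_eq_getElem_cons hlt'
    have hget : PySem.List.pyGet? cs (i : Int) = some cs[i] := by
      rw [PySem.List.pyGet?_natCast]; exact List.getElem?_eq_getElem hlen
    rw [hcs, hab, List.zip_cons_cons, List.map_cons, List.sum_cons,
        countAlt_eq cs (i + 1), hget]
    show (if ((cs[i].toNat : Int) - 97 == (i : Int)) then (1 : Int) else 0) + _ = _
    congr 1
    have hcond : ((cs[i].toNat : Int) - 97 == (i : Int)) = (cs[i] == alphabetB[i]) := by
      by_cases h : cs[i] = alphabetB[i]
      · simp [h, beq_iff_eq]
        omega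
      · have hne : cs[i].toNat ≠ 97 + i := fun he =>
          h (char_toNat_inj _ _ (he.trans hat.symm))
        have h2 : ¬ ((cs[i].toNat : Int) - 97 = (i : Int)) := by omega
        simp [h, h2]
    rw [hcond]
termination_by cs.length - i
decreasing_by omega

lemma solve_eq (lst : List String) : solve lst = solve_alt lst := by
  unfold solve solve_alt
  rw [PySem.List.foldl_append_singleton_eq_map]
  apply List.map_congr_left
  intro e _
  have hA := inner_eq (PySem.Str.lower e).toList 0 0
  have hB := countAlt_eq (PySem.Str.lower e).toList 0
  simp only [Nat.cast_zero, List.drop_zero, zero_add] at hA hB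
  rw [hA, hB]

-- ===== VERDICT (by name: the statement is the Claim_ definition above) =====
theorem solve_spec : Claim_equal_solve := by
  intro lst _
  unfold Spec_solve
  exact solve_eq lst
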